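-- pv_equiv track=rewrite | github.com/avengerpenguin/advent-of-code | python/2024/02/check.py | check_safe_with_removal
-- ===== SOURCE A (Python) =====
-- def check_safe(line):
--     first, second, *_ = line
--     if first == second:
--         return False
--     else:
--         increasing = second > first
--
--     for first, second in zip(line, line[1:]):
--         if increasing:
--             if second <= first:
--                 return False
--             if second - first > 3:
--                 return False
--
--         else:
--             if first <= second:
--                 return False
--             if first - second > 3:
--                 return False
--
--     return True
--
-- def check_safe_with_removal(line):
--     if check_safe(line):
--         return True
--
--     for n in range(len(line)):
--         new_list = line[:n] + line[n+1:]
--         if check_safe(new_list):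
--             return True
--
--     return False
-- ===== SOURCE B (Python) =====
-- def check_safe_with_removal(line):
--     def all_good(xs, good):
--         return all(good(a, b) for a, b in zip(xs, xs[1:]))
--
--     def first_bad(xs, good):
--         for i, (a, b) in enumerate(zip(xs, xs[1:])):
--             if not good(a, b):
--                 return i
--         return None
--
--     def fixable(xs, good):
--         i = first_bad(xs, good)
--         if i is None:
--             return True
--         return (all_good(xs[:i] + xs[i + 1:], good)
--                 or all_good(xs[:i + 1] + xs[i + 2:], good))
--
--     inc = lambda a, b: 1 <= b - a <= 3
--     dec = lambda a, b: 1 <= a - b <= 3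
--     return fixable(line, inc) or fixable(line, dec)
-- ===== Notes on version B (the rewrite author's own statement) =====
-- stated objective: faster
-- what changed: Instead of re-checking safety after removing every index (O(n^2)), B finds the first violating adjacent pair per direction and only tests removing one of its two endpoints (O(n)).
import Mathlib
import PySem

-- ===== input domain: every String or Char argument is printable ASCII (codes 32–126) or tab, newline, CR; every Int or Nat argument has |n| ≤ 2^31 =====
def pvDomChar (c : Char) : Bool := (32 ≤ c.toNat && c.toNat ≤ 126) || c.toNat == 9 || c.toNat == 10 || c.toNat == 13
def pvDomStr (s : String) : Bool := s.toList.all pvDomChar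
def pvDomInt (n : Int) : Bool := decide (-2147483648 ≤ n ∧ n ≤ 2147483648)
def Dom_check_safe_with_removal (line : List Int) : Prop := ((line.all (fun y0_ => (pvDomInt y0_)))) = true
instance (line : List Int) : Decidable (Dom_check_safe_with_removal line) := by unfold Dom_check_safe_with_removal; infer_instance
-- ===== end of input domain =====

-- B replaces A's try-removing-every-index scan by finding the first violating adjacent
-- pair per direction and testing only the removal of its two endpoints (objective: faster).

-- ===== PORT A =====
-- the for-loop of check_safe over zip(line, line[1:])
def csLoop (pairs : List (Int × Int)) (increasing : Bool) : Bool :=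
  match pairs with
  | [] => true
  | (f, s) :: rest =>
    if increasing then
      if s ≤ f then false
      else if s - f > 3 then false
      else csLoop rest increasing
    else
      if f ≤ s then false
      else if f - s > 3 then false
      else csLoop rest increasing

def check_safe (line : List Int) : Bool :=
  match line with
  | first :: second :: _ =>
    if first = second then false
    else csLoop (line.zip (line.drop 1)) (decide (second > first))
  | _ => false   -- Python raises ValueError here (unpacking); excluded by Pre_

-- the for-loop of check_safe_with_removal over range(len(line))
def cswrLoop (line : List Int) : List Nat → Bool
  | [] => false
  | n :: rest =>
    let new_list := line.take n ++ line.drop (n + 1)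
    if check_safe new_list then true else cswrLoop line rest

def check_safe_with_removal (line : List Int) : Bool :=
  if check_safe line then true
  else cswrLoop line (List.range line.length)

-- ===== PORT B =====
def goodInc (a b : Int) : Bool := decide (1 ≤ b - a) && decide (b - a ≤ 3)
def goodDec (a b : Int) : Bool := decide (1 ≤ a - b) && decide (a - b ≤ 3)

def allGood (good : Int → Int → Bool) (xs : List Int) : Bool :=
  (xs.zip (xs.drop 1)).all fun p => good p.1 p.2

-- first_bad: index of the first adjacent pair violating `good`
def firstBadAux (good : Int → Int → Bool) : List Int → Nat → Option Nat
  | a :: b :: rest, i => if !(good a b) then some i else firstBadAux good (b :: rest) (i + 1)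
  | _, _ => none

def fixable (good : Int → Int → Bool) (xs : List Int) : Bool :=
  match firstBadAux good xs 0 with
  | none => true
  | some i =>
      allGood good (xs.take i ++ xs.drop (i + 1)) ||
      allGood good (xs.take (i + 1) ++ xs.drop (i + 2))

def check_safe_with_removal_alt (line : List Int) : Bool :=
  fixable goodInc line || fixable goodDec line

-- ===== PRECONDITION & SPEC =====
-- Pre_ excludes exactly the inputs on which the Python A raises ValueError:
-- lines with fewer than 2 elements, and 2-element lines whose single pair is
-- already unsafe (the removal loop then calls check_safe on a 1-element list).
def Pre_check_safe_with_removal (line : List Int) : Prop :=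
  3 ≤ line.length ∨
    (line.length = 2 ∧ line.getD 0 0 ≠ line.getD 1 0 ∧ (line.getD 1 0 - line.getD 0 0).natAbs ≤ 3)
instance (line : List Int) : Decidable (Pre_check_safe_with_removal line) := by
  unfold Pre_check_safe_with_removal; infer_instance

def pvWitness_check_safe_with_removal : List Int := [1, 2, 4]

def Spec_check_safe_with_removal (line : List Int) (out : Bool) : Prop :=
  out = check_safe_with_removal_alt line
instance (line : List Int) (out : Bool) : Decidable (Spec_check_safe_with_removal line out) := by
  unfold Spec_check_safe_with_removal; infer_instance

-- ===== CLAIM (what is proved, stated in full; the proofs are below) =====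
def Claim_equal_check_safe_with_removal : Prop := ∀ (line : List Int), Dom_check_safe_with_removal line → Pre_check_safe_with_removal line → Spec_check_safe_with_removal line (check_safe_with_removal line)

-- ===== LEMMAS AND PROOFS =====

theorem allGood_cons (good : Int → Int → Bool) (a b : Int) (t : List Int) :
    allGood good (a :: b :: t) = (good a b && allGood good (b :: t)) := by
  simp [allGood]

-- index characterisation of allGood, via getD
theorem allGood_iff_getD (good : Int → Int → Bool) :
    ∀ (xs : List Int), allGood good xs = true ↔
      ∀ j, j + 1 < xs.length → good (xs.getD j 0) (xs.getD (j + 1) 0) = true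
  | [] => by simp [allGood]
  | [_] => by simp [allGood]
  | a :: b :: t => by
    rw [allGood_cons, Bool.and_eq_true, allGood_iff_getD good (b :: t)]
    constructor
    · rintro ⟨h0, hrec⟩ j hj
      cases j with
      | zero => simpa using h0
      | succ j => simpa using hrec j (by simp at hj ⊢; omega)
    · intro h
      refine ⟨by simpa using h 0 (by simp), fun j hj => ?_⟩
      simpa using h (j + 1) (by simp at hj ⊢; omega)

theorem allGood_false_of_bad (good : Int → Int → Bool) (xs : List Int) (j : Nat)
    (hj : j + 1 < xs.length) (hbad : good (xs.getD j 0) (xs.getD (j + 1) 0) = false) :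
    allGood good xs = false := by
  cases hall : allGood good xs with
  | false => rfl
  | true =>
    have := (allGood_iff_getD good xs).mp hall j hj
    rw [hbad] at this
    exact absurd this (by simp)

theorem getD_eraseIdx (xs : List Int) (n j : Nat) (hn : n < xs.length)
    (hj : j < xs.length - 1) :
    (xs.eraseIdx n).getD j 0 = if j < n then xs.getD j 0 else xs.getD (j + 1) 0 := by
  have hlen : (xs.eraseIdx n).length = xs.length - 1 := by
    simp [List.length_eraseIdx, hn]
  have hje : j < (xs.eraseIdx n).length := by omega
  rw [List.getD_eq_getElem _ _ hje, List.getElem_eraseIdx]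
  split
  · rw [List.getD_eq_getElem _ _ (by omega : j < xs.length)]
  · rw [List.getD_eq_getElem _ _ (by omega : j + 1 < xs.length)]

theorem firstBadAux_none (good : Int → Int → Bool) :
    ∀ (xs : List Int) (k : Nat), firstBadAux good xs k = none → allGood good xs = true
  | [], _, _ => rfl
  | [_], _, _ => rfl
  | a :: b :: t, k, h => by
    unfold firstBadAux at h
    cases hg : good a b with
    | false => rw [hg] at h; simp at h
    | true =>
      rw [hg] at h; simp at h
      rw [allGood_cons, hg, Bool.true_and]
      exact firstBadAux_none good (b :: t) (k + 1) h

theorem firstBadAux_some (good : Int → Int → Bool) :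
    ∀ (xs : List Int) (k i : Nat), firstBadAux good xs k = some i →
      ∃ j, i = k + j ∧ j + 1 < xs.length ∧ good (xs.getD j 0) (xs.getD (j + 1) 0) = false
  | [], _, _, h => by simp [firstBadAux] at h
  | [_], _, _, h => by simp [firstBadAux] at h
  | a :: b :: t, k, i, h => by
    unfold firstBadAux at h
    cases hg : good a b with
    | true =>
      rw [hg] at h; simp at h
      obtain ⟨j, hij, hlen, hbad⟩ := firstBadAux_some good (b :: t) (k + 1) i h
      refine ⟨j + 1, by omega, by simp at hlen ⊢; omega, by simpa using hbad⟩
    | false =>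
      rw [hg] at h; simp at h
      exact ⟨0, by omega, by simp, by simpa using hg⟩

theorem firstBad_some0 (good : Int → Int → Bool) (xs : List Int) (i : Nat)
    (h : firstBadAux good xs 0 = some i) :
    i + 1 < xs.length ∧ good (xs.getD i 0) (xs.getD (i + 1) 0) = false := by
  obtain ⟨j, hij, hlen, hbad⟩ := firstBadAux_some good xs 0 i h
  have hji : i = j := by omega
  subst hji
  exact ⟨hlen, hbad⟩

-- the two branch conditions of csLoop are exactly goodInc / goodDec
theorem csLoop_true_eq (ps : List (Int × Int)) :
    csLoop ps true = ps.all fun p => goodInc p.1 p.2 := by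
  induction ps with
  | nil => rfl
  | cons p rest ih =>
    obtain ⟨f, s⟩ := p
    simp only [csLoop, List.all_cons, if_true]
    split_ifs with h1 h2
    · have : goodInc f s = false := by simp [goodInc]; omega
      rw [this, Bool.false_and]
    · have : goodInc f s = false := by simp [goodInc]; omega
      rw [this, Bool.false_and]
    · have : goodInc f s = true := by simp [goodInc]; omega
      rw [this, Bool.true_and, ih]

theorem csLoop_false_eq (ps : List (Int × Int)) :
    csLoop ps false = ps.all fun p => goodDec p.1 p.2 := by
  induction ps with
  | nil => rfl
  | cons p rest ih =>
    obtain ⟨f, s⟩ := p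
    simp only [csLoop, List.all_cons, Bool.false_eq_true, if_false]
    split_ifs with h1 h2
    · have : goodDec f s = false := by simp [goodDec]; omega
      rw [this, Bool.false_and]
    · have : goodDec f s = false := by simp [goodDec]; omega
      rw [this, Bool.false_and]
    · have : goodDec f s = true := by simp [goodDec]; omega
      rw [this, Bool.true_and, ih]

theorem check_safe_eq (a b : Int) (t : List Int) :
    check_safe (a :: b :: t) = (allGood goodInc (a :: b :: t) || allGood goodDec (a :: b :: t)) := by
  unfold check_safe
  by_cases hab : a = b
  · subst hab
    rw [allGood_cons, allGood_cons]
    simp [goodInc, goodDec]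
  · simp only [if_neg hab]
    by_cases hlt : a < b
    · rw [show (decide (b > a)) = true by simpa using hlt, csLoop_true_eq]
      have hdec : goodDec a b = false := by simp [goodDec]; omega
      rw [allGood_cons goodDec, hdec]
      simp [allGood]
    · have hgt : b < a := by omega
      rw [show (decide (b > a)) = false by simp; omega, csLoop_false_eq]
      have hinc : goodInc a b = false := by simp [goodInc]; omega
      rw [allGood_cons goodInc, hinc]
      simp [allGood]

theorem check_safe_eq_of_len (xs : List Int) (h : 2 ≤ xs.length) :
    check_safe xs = (allGood goodInc xs || allGood goodDec xs) := by
  match xs with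
  | [] => simp at h
  | [_] => simp at h
  | a :: b :: t => exact check_safe_eq a b t

theorem cswrLoop_eq (line : List Int) :
    ∀ ns, cswrLoop line ns = ns.any fun n => check_safe (line.take n ++ line.drop (n + 1))
  | [] => rfl
  | n :: rest => by
    simp only [cswrLoop, List.any_cons]
    split_ifs with h <;> simp [h, cswrLoop_eq line rest]

theorem any_or_split (ns : List Nat) (f g : Nat → Bool) :
    (ns.any fun n => f n || g n) = (ns.any f || ns.any g) := by
  induction ns with
  | nil => rfl
  | cons a t ih =>
    simp only [List.any_cons, ih]
    cases f a <;> cases g a <;> simp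

theorem any_congr_mem {α : Type} (l : List α) (p q : α → Bool)
    (h : ∀ a ∈ l, p a = q a) : l.any p = l.any q := by
  induction l with
  | nil => rfl
  | cons a t ih =>
    simp only [List.any_cons]
    rw [h a (by simp), ih fun x hx => h x (by simp [hx])]

-- removing an index other than the two endpoints of a bad pair keeps the pair adjacent
theorem allGood_rm_false (good : Int → Int → Bool) (xs : List Int) (i n : Nat)
    (hi : i + 1 < xs.length)
    (hbad : good (xs.getD i 0) (xs.getD (i + 1) 0) = false)
    (hn : n < xs.length) (hni : n ≠ i) (hni1 : n ≠ i + 1) :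
    allGood good (xs.take n ++ xs.drop (n + 1)) = false := by
  rw [← List.eraseIdx_eq_take_drop_succ]
  have hlen : (xs.eraseIdx n).length = xs.length - 1 := by
    simp [List.length_eraseIdx, hn]
  by_cases hcase : n < i
  · -- the pair sits at indices i-1, i of the shortened list
    apply allGood_false_of_bad good _ (i - 1) (by omega)
    rw [getD_eraseIdx xs n (i - 1) hn (by omega),
        getD_eraseIdx xs n (i - 1 + 1) hn (by omega)]
    rw [if_neg (by omega), if_neg (by omega),
        show i - 1 + 1 = i from by omega]
    exact hbad
  · -- n > i + 1: the pair sits at indices i, i+1 of the shortened list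
    have hgt : i + 1 < n := by omega
    apply allGood_false_of_bad good _ i (by omega)
    rw [getD_eraseIdx xs n i hn (by omega),
        getD_eraseIdx xs n (i + 1) hn (by omega)]
    rw [if_pos (by omega), if_pos (by omega)]
    exact hbad

theorem fixable_of_allGood (good : Int → Int → Bool) (xs : List Int)
    (h : allGood good xs = true) : fixable good xs = true := by
  unfold fixable
  cases hfb : firstBadAux good xs 0 with
  | none => rfl
  | some i =>
    obtain ⟨hlen, hbad⟩ := firstBad_some0 good xs i hfb
    have := (allGood_iff_getD good xs).mp h i hlen
    rw [hbad] at this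
    exact absurd this (by simp)

-- one direction: brute force over all removals = endpoint test at the first bad pair
theorem dir_eq (good : Int → Int → Bool) (xs : List Int) :
    (allGood good xs ||
      (List.range xs.length).any fun n => allGood good (xs.take n ++ xs.drop (n + 1)))
      = fixable good xs := by
  unfold fixable
  cases hfb : firstBadAux good xs 0 with
  | none => rw [firstBadAux_none good xs 0 hfb, Bool.true_or]
  | some i =>
    obtain ⟨hlen, hbad⟩ := firstBad_some0 good xs i hfb
    rw [allGood_false_of_bad good xs i hlen hbad, Bool.false_or]
    rw [Bool.eq_iff_iff]
    constructor
    · intro h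
      obtain ⟨n, hmem, hgn⟩ := List.any_eq_true.mp h
      have hn : n < xs.length := List.mem_range.mp hmem
      by_cases h1 : n = i
      · subst h1; simp [hgn]
      · by_cases h2 : n = i + 1
        · subst h2; simp [hgn]
        · exact absurd hgn (by simp [allGood_rm_false good xs i n hlen hbad hn h1 h2])
    · intro h
      rcases Bool.or_eq_true_iff.mp h with h' | h'
      · exact List.any_eq_true.mpr ⟨i, List.mem_range.mpr (by omega), h'⟩
      · exact List.any_eq_true.mpr ⟨i + 1, List.mem_range.mpr (by omega), h'⟩

-- a 2-element line admitted by Pre_ is already safe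
theorem check_safe_pair (a b : Int) (hne : a ≠ b) (habs : (b - a).natAbs ≤ 3) :
    check_safe [a, b] = true := by
  show (if a = b then false
    else csLoop ([a, b].zip (List.drop 1 [a, b])) (decide (b > a))) = true
  rw [if_neg hne]
  by_cases hlt : a < b
  · rw [show (decide (b > a)) = true by simpa using hlt]
    simp [csLoop]; omega
  · rw [show (decide (b > a)) = false by simp; omega]
    simp [csLoop]; omega

theorem rm_length (xs : List Int) (n : Nat) (hn : n < xs.length) :
    (xs.take n ++ xs.drop (n + 1)).length = xs.length - 1 := by
  rw [← List.eraseIdx_eq_take_drop_succ]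
  simp [List.length_eraseIdx, hn]

-- ===== VERDICT (by name: the statement is the Claim_ definition above) =====
theorem check_safe_with_removal_spec : Claim_equal_check_safe_with_removal := by
  intro line _ hPre
  unfold Spec_check_safe_with_removal check_safe_with_removal check_safe_with_removal_alt
  have hlen2 : 2 ≤ line.length := by
    rcases hPre with h | ⟨h, _⟩ <;> omega
  by_cases hs : check_safe line = true
  · rw [if_pos hs]
    rw [check_safe_eq_of_len line hlen2] at hs
    rcases Bool.or_eq_true_iff.mp hs with h | h
    · rw [fixable_of_allGood goodInc line h, Bool.true_or]
    · rw [fixable_of_allGood goodDec line h, Bool.or_true]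
  · have hsf : check_safe line = false := Bool.not_eq_true _ ▸ (by simpa using hs)
    have hlen3 : 3 ≤ line.length := by
      rcases hPre with h | ⟨h2, hne, habs⟩
      · exact h
      · exfalso
        obtain ⟨a, b, rfl⟩ : ∃ a b, line = [a, b] := by
          match line, h2 with
          | [a, b], _ => exact ⟨a, b, rfl⟩
        exact hs (check_safe_pair a b (by simpa using hne) (by simpa using habs))
    rw [if_neg hs, cswrLoop_eq]
    have hboth : allGood goodInc line = false ∧ allGood goodDec line = false := by
      rw [check_safe_eq_of_len line hlen2] at hsf
      exact ⟨by cases h : allGood goodInc line <;> simp [h] at hsf ⊢,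
             by cases h : allGood goodDec line <;> simp [h] at hsf ⊢⟩
    calc (List.range line.length).any
            (fun n => check_safe (line.take n ++ line.drop (n + 1)))
        = (List.range line.length).any
            (fun n => allGood goodInc (line.take n ++ line.drop (n + 1)) ||
                      allGood goodDec (line.take n ++ line.drop (n + 1))) := by
          apply any_congr_mem
          intro n hn
          apply check_safe_eq_of_len
          rw [rm_length line n (List.mem_range.mp hn)]
          omega
      _ = ((List.range line.length).any
            (fun n => allGood goodInc (line.take n ++ line.drop (n + 1))) ||
           (List.range line.length).any
            (fun n => allGood goodDec (line.take n ++ line.drop (n + 1)))) :=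
          any_or_split _ _ _
      _ = (fixable goodInc line || fixable goodDec line) := by
          rw [← dir_eq goodInc line, ← dir_eq goodDec line, hboth.1, hboth.2,
              Bool.false_or, Bool.false_or]
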